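-- pv_equiv track=rewrite | github.com/tjresearch/research-ajit_ben | Unfinished Code/cubedetection.py | count_colours
-- ===== SOURCE A (Python) =====
-- def count_colours(fcheck, countall):
--     (wcount, bcount, rcount, gcount, ycount, ocount) = countall
--     for pos in range(9):
--         if fcheck[pos] == "W":
--             wcount += 1
--         elif fcheck[pos] == "B":
--             bcount += 1
--         elif fcheck[pos] == "R":
--             rcount += 1
--         elif fcheck[pos] == "G":
--             gcount += 1
--         elif fcheck[pos] == "Y":
--             ycount += 1
--         elif fcheck[pos] == "O":
--             ocount += 1
--     countall = (wcount, bcount, rcount, gcount, ycount, ocount)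
--     return countall
-- ===== SOURCE B (Python) =====
-- def count_colours(fcheck, countall):
--     face = [fcheck[pos] for pos in range(9)]
--     return tuple(c + face.count(col) for c, col in zip(countall, "WBRGYO"))
-- ===== Notes on version B (the rewrite author's own statement) =====
-- stated objective: simpler
-- what changed: Replaces the six-accumulator elif cascade inside the loop by materialising the nine face cells once and returning a single tuple that adds a per-colour .count to each component of countall.
import Mathlib
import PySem

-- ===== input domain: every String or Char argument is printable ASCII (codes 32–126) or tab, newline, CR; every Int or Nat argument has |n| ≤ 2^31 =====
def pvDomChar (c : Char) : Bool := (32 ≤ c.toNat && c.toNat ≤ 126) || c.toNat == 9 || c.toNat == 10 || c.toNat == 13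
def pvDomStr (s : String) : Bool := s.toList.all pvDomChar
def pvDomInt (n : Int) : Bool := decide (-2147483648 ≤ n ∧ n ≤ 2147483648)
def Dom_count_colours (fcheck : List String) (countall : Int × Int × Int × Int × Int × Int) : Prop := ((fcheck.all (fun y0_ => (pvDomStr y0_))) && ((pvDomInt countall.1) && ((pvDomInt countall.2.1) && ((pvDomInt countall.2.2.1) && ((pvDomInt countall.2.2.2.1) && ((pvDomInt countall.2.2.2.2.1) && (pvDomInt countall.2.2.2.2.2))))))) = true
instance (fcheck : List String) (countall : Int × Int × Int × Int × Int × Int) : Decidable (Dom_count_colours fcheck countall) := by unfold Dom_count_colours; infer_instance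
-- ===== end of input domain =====

-- ===== PORT A =====
-- B replaces A's six-accumulator elif cascade by materialising the nine face cells once
-- and adding a per-colour .count to each component (objective: simpler; return value only).
def count_colours (fcheck : List String) (countall : Int × Int × Int × Int × Int × Int) : Int × Int × Int × Int × Int × Int :=
  let st := (PySem.List.pyRange 0 9 1).foldl
    (fun (st : Int × Int × Int × Int × Int × Int) pos =>
      let s := PySem.List.pyGetD fcheck pos ""   -- fcheck[pos]; Pre_ keeps the index in range
      if s = "W" then (st.1 + 1, st.2.1, st.2.2.1, st.2.2.2.1, st.2.2.2.2.1, st.2.2.2.2.2)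
      else if s = "B" then (st.1, st.2.1 + 1, st.2.2.1, st.2.2.2.1, st.2.2.2.2.1, st.2.2.2.2.2)
      else if s = "R" then (st.1, st.2.1, st.2.2.1 + 1, st.2.2.2.1, st.2.2.2.2.1, st.2.2.2.2.2)
      else if s = "G" then (st.1, st.2.1, st.2.2.1, st.2.2.2.1 + 1, st.2.2.2.2.1, st.2.2.2.2.2)
      else if s = "Y" then (st.1, st.2.1, st.2.2.1, st.2.2.2.1, st.2.2.2.2.1 + 1, st.2.2.2.2.2)
      else if s = "O" then (st.1, st.2.1, st.2.2.1, st.2.2.2.1, st.2.2.2.2.1, st.2.2.2.2.2 + 1)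
      else st) countall
  st

-- ===== PORT B =====
def count_colours_alt (fcheck : List String) (countall : Int × Int × Int × Int × Int × Int) : Int × Int × Int × Int × Int × Int :=
  let face := (PySem.List.pyRange 0 9 1).map (fun pos => PySem.List.pyGetD fcheck pos "")
  (countall.1 + face.count "W", countall.2.1 + face.count "B", countall.2.2.1 + face.count "R",
   countall.2.2.2.1 + face.count "G", countall.2.2.2.2.1 + face.count "Y", countall.2.2.2.2.2 + face.count "O")

-- ===== PRECONDITION & SPEC =====
-- Python A indexes fcheck[0..8], so it raises IndexError on lists shorter than 9; exactly those inputs are excluded.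
def Pre_count_colours (fcheck : List String) (countall : Int × Int × Int × Int × Int × Int) : Prop :=
  9 ≤ fcheck.length
instance (fcheck : List String) (countall : Int × Int × Int × Int × Int × Int) : Decidable (Pre_count_colours fcheck countall) := by unfold Pre_count_colours; infer_instance
def pvWitness_count_colours : List String × (Int × Int × Int × Int × Int × Int) :=
  (["W", "W", "B", "R", "G", "Y", "O", "x", "W"], (0, 1, 2, 3, 4, 5))
def Spec_count_colours (fcheck : List String) (countall : Int × Int × Int × Int × Int × Int) (out : Int × Int × Int × Int × Int × Int) : Prop := out = count_colours_alt fcheck countall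
instance (fcheck : List String) (countall : Int × Int × Int × Int × Int × Int) (out : Int × Int × Int × Int × Int × Int) : Decidable (Spec_count_colours fcheck countall out) := by unfold Spec_count_colours; infer_instance

-- ===== CLAIM (what is proved, stated in full; the proofs are below) =====
def Claim_equal_count_colours : Prop := ∀ (fcheck : List String) (countall : Int × Int × Int × Int × Int × Int), Dom_count_colours fcheck countall → Pre_count_colours fcheck countall → Spec_count_colours fcheck countall (count_colours fcheck countall)

-- ===== LEMMAS AND PROOFS =====
-- Running A's elif cascade over any list of positions equals adding, to each start value,
-- the count of the corresponding colour in the list of looked-up cells.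
theorem foldl_cascade_positions (fcheck : List String) (ps : List Int) (w b r g y o : Int) :
    ps.foldl
      (fun (st : Int × Int × Int × Int × Int × Int) pos =>
        let s := PySem.List.pyGetD fcheck pos ""
        if s = "W" then (st.1 + 1, st.2.1, st.2.2.1, st.2.2.2.1, st.2.2.2.2.1, st.2.2.2.2.2)
        else if s = "B" then (st.1, st.2.1 + 1, st.2.2.1, st.2.2.2.1, st.2.2.2.2.1, st.2.2.2.2.2)
        else if s = "R" then (st.1, st.2.1, st.2.2.1 + 1, st.2.2.2.1, st.2.2.2.2.1, st.2.2.2.2.2)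
        else if s = "G" then (st.1, st.2.1, st.2.2.1, st.2.2.2.1 + 1, st.2.2.2.2.1, st.2.2.2.2.2)
        else if s = "Y" then (st.1, st.2.1, st.2.2.1, st.2.2.2.1, st.2.2.2.2.1 + 1, st.2.2.2.2.2)
        else if s = "O" then (st.1, st.2.1, st.2.2.1, st.2.2.2.1, st.2.2.2.2.1, st.2.2.2.2.2 + 1)
        else st) (w, b, r, g, y, o)
    = (let face := ps.map (fun pos => PySem.List.pyGetD fcheck pos "")
       (w + face.count "W", b + face.count "B", r + face.count "R",
        g + face.count "G", y + face.count "Y", o + face.count "O")) := by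
  induction ps generalizing w b r g y o with
  | nil => simp
  | cons p t ih =>
    rw [List.foldl_cons]
    simp only [List.map_cons]
    split_ifs with h1 h2 h3 h4 h5 h6 <;>
      rw [ih, Prod.ext_iff] <;> clear ih <;> simp_all <;> omega

-- ===== VERDICT (by name: the statement is the Claim_ definition above) =====
theorem count_colours_spec : Claim_equal_count_colours := by
  intro fcheck countall _ _
  show count_colours fcheck countall = count_colours_alt fcheck countall
  exact foldl_cascade_positions fcheck (PySem.List.pyRange 0 9 1) countall.1 countall.2.1
    countall.2.2.1 countall.2.2.2.1 countall.2.2.2.2.1 countall.2.2.2.2.2
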